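-- pv_equiv track=rewrite | github.com/Ghostkeeper/Luna | plugins/data/real/real_number.py | is_serialised
-- ===== SOURCE A (Python) =====
-- def is_serialised(serialised):
-- 	"""
-- 	Detects whether a byte stream represents a real number.
-- 	:param serialised: A byte stream which must be identified as being a real
-- 	number or not.
-- 	:return: ``True`` if the stream likely represents a real number, or
-- 	``False`` if it does not.
-- 	"""
-- 	#This works with a simple finite state automaton in a linear fashion:
-- 	#initial -> integer_start -> integer -> fractional_start -> fractional -> exponent_initial -> exponent_start -> exponent
-- 	#Each state represents what character is expected next.
-- 	#The FSA solution is not pretty, but it's the only way it could be made to work with a possibly infinite byte stream.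
-- 	state = "initial"
-- 	for byte in serialised:
-- 		if state == "initial": #Initial state: May be a negative sign or integer_start.
-- 			if byte == b"-"[0]:
-- 				state = "integer_start"
-- 			elif byte >= b"0"[0] and byte <= b"9"[0]:
-- 				state = "integer"
-- 			else:
-- 				return False
-- 		elif state == "integer_start": #First character of integer. An integer must have at least 1 digit.
-- 			if byte >= b"0"[0] and byte <= b"9"[0]:
-- 				state = "integer"
-- 			else:
-- 				return False
-- 		elif state == "integer": #Consecutive characters of the integer. May be a period, indicating start of fractional, or an E, indicating start of exponent.
-- 			if byte >= b"0"[0] and byte <= b"9"[0]: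
-- 				pass #Still integer.
-- 			elif byte == b"."[0]:
-- 				state = "fractional_start"
-- 			elif byte == b"e"[0] or byte == b"E"[0]:
-- 				state = "exponent_initial"
-- 			else:
-- 				return False
-- 		elif state == "fractional_start": #Start of fractional part.
-- 			if byte >= b"0"[0] and byte <= b"9"[0]:
-- 				state = "fractional"
-- 			else:
-- 				return False
-- 		elif state == "fractional": #Continuation of factional part. May be an E, indicating start of exponent.
-- 			if byte >= b"0"[0] and byte <= b"9"[0]:
-- 				pass #Still fractional part.
-- 			elif byte == b"e"[0] or byte == b"E"[0]:
-- 				state = "exponent_initial"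
-- 			else:
-- 				return False
-- 		elif state == "exponent_initial": #Initial state of exponent, may be negative or a number.
-- 			if byte == b"-"[0] or byte == b"+"[0]:
-- 				state = "exponent_start"
-- 			elif byte >= b"0"[0] and byte <= b"9"[0]:
-- 				state = "exponent"
-- 			else:
-- 				return False
-- 		elif state == "exponent_start": #First character of an exponent. Not an end state.
-- 			if byte >= b"0"[0] and byte <= b"9"[0]:
-- 				state = "exponent"
-- 			else:
-- 				return False
-- 		elif state == "exponent": #Continuation of an exponent.
-- 			if byte >= b"0"[0] and byte <= b"9"[0]:
-- 				pass #Still exponent.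
-- 			else:
-- 				return False
-- 	return state == "fractional" or state == "exponent" #Allowable end states.
-- ===== SOURCE B (Python) =====
-- def is_serialised(serialised):
--     """Recursive-descent check: optional '-', digit run, then fraction and/or
--     exponent, consuming list suffixes instead of stepping a state machine."""
--     bs = list(serialised)
--
--     def digits1(xs):
--         # Consume one or more digits; return the remainder, or None if no digit.
--         if not xs or not (48 <= xs[0] <= 57):
--             return None
--         i = 1
--         while i < len(xs) and 48 <= xs[i] <= 57:
--             i += 1
--         return xs[i:]
--
--     def exp_part(xs):
--         # [eE][+-]?digit+ consuming the whole remainder.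
--         if not xs or xs[0] not in (101, 69):
--             return False
--         xs = xs[1:]
--         if xs and xs[0] in (43, 45):
--             xs = xs[1:]
--         return digits1(xs) == []
--
--     rest = bs[1:] if bs[:1] == [45] else bs
--     rest = digits1(rest)
--     if rest is None:
--         return False
--     if rest and rest[0] == 46:
--         rest = digits1(rest[1:])
--         if rest is None:
--             return False
--         if not rest:
--             return True
--         return exp_part(rest)
--     return exp_part(rest)
-- ===== Notes on version B (the rewrite author's own statement) =====
-- stated objective: simpler
-- what changed: Replaces the per-byte string-labelled state machine by a recursive-descent parser that consumes list suffixes: optional '-', a digit run, then a fractional part and/or an exponent part checked structurally.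
import Mathlib
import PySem

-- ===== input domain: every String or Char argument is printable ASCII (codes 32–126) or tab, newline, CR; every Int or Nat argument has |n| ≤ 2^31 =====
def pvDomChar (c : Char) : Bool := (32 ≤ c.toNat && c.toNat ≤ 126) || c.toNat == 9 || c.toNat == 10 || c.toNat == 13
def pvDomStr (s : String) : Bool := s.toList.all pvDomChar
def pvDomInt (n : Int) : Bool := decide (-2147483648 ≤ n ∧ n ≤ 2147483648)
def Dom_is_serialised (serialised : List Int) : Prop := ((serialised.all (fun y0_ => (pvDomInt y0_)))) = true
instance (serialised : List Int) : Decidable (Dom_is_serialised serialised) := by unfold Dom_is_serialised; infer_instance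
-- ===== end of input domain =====

-- B replaces A's per-byte string-state machine by a recursive-descent parser over
-- list suffixes (sign, digit run, fraction, exponent); objective: simpler.

-- ===== PORT A =====
-- A's loop with early returns; the Python string states are kept verbatim.
def isSerLoop (state : String) : List Int → Bool
  | [] => state == "fractional" || state == "exponent"
  | byte :: rest =>
    if state == "initial" then
      if byte == 45 then isSerLoop "integer_start" rest
      else if 48 ≤ byte ∧ byte ≤ 57 then isSerLoop "integer" rest
      else false
    else if state == "integer_start" then
      if 48 ≤ byte ∧ byte ≤ 57 then isSerLoop "integer" rest
      else false
    else if state == "integer" then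
      if 48 ≤ byte ∧ byte ≤ 57 then isSerLoop "integer" rest
      else if byte == 46 then isSerLoop "fractional_start" rest
      else if byte == 101 || byte == 69 then isSerLoop "exponent_initial" rest
      else false
    else if state == "fractional_start" then
      if 48 ≤ byte ∧ byte ≤ 57 then isSerLoop "fractional" rest
      else false
    else if state == "fractional" then
      if 48 ≤ byte ∧ byte ≤ 57 then isSerLoop "fractional" rest
      else if byte == 101 || byte == 69 then isSerLoop "exponent_initial" rest
      else false
    else if state == "exponent_initial" then
      if byte == 45 || byte == 43 then isSerLoop "exponent_start" rest
      else if 48 ≤ byte ∧ byte ≤ 57 then isSerLoop "exponent" rest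
      else false
    else if state == "exponent_start" then
      if 48 ≤ byte ∧ byte ≤ 57 then isSerLoop "exponent" rest
      else false
    else if state == "exponent" then
      if 48 ≤ byte ∧ byte ≤ 57 then isSerLoop "exponent" rest
      else false
    else false

def is_serialised (serialised : List Int) : Bool := isSerLoop "initial" serialised

-- ===== PORT B =====
-- drop the leading digit run (the while loop inside Source B's digits1)
def pvDropD : List Int → List Int
  | [] => []
  | b :: r => if 48 ≤ b ∧ b ≤ 57 then pvDropD r else b :: r

-- Source B digits1: consume one or more digits, none if no leading digit
def pvDigits1 : List Int → Option (List Int)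
  | [] => none
  | b :: r => if 48 ≤ b ∧ b ≤ 57 then some (pvDropD r) else none

-- Source B exp_part after the e/E: optional sign then a digit run consuming everything
def pvExpTail (xs : List Int) : Bool :=
  let xs' := match xs with
    | d :: t => if d == 43 || d == 45 then t else xs
    | [] => xs
  pvDigits1 xs' == some []

-- Source B exp_part
def pvExpPart : List Int → Bool
  | [] => false
  | c :: r => if c == 101 || c == 69 then pvExpTail r else false

def is_serialised_alt (serialised : List Int) : Bool :=
  let rest0 := match serialised with
    | b :: t => if b == 45 then t else serialised
    | [] => serialised
  match pvDigits1 rest0 with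
  | none => false
  | some r1 =>
    match r1 with
    | b :: r2 =>
      if b == 46 then
        match pvDigits1 r2 with
        | none => false
        | some [] => true
        | some r3 => pvExpPart r3
      else pvExpPart (b :: r2)
    | [] => pvExpPart r1

-- ===== PRECONDITION & SPEC =====
def Spec_is_serialised (serialised : List Int) (out : Bool) : Prop := out = is_serialised_alt serialised
instance (serialised : List Int) (out : Bool) : Decidable (Spec_is_serialised serialised out) := by unfold Spec_is_serialised; infer_instance

-- ===== CLAIM (what is proved, stated in full; the proofs are below) =====
def Claim_equal_is_serialised : Prop := ∀ (serialised : List Int), Dom_is_serialised serialised → Spec_is_serialised serialised (is_serialised serialised)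

-- ===== LEMMAS AND PROOFS =====

-- one-step unfoldings of A's loop at each literal state (all definitional)
theorem step_initial (b : Int) (r : List Int) :
    isSerLoop "initial" (b::r) =
      if b == 45 then isSerLoop "integer_start" r
      else if 48 ≤ b ∧ b ≤ 57 then isSerLoop "integer" r
      else false := rfl
theorem step_intStart (b : Int) (r : List Int) :
    isSerLoop "integer_start" (b::r) =
      if 48 ≤ b ∧ b ≤ 57 then isSerLoop "integer" r else false := rfl
theorem step_int (b : Int) (r : List Int) :
    isSerLoop "integer" (b::r) =
      if 48 ≤ b ∧ b ≤ 57 then isSerLoop "integer" r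
      else if b == 46 then isSerLoop "fractional_start" r
      else if b == 101 || b == 69 then isSerLoop "exponent_initial" r
      else false := rfl
theorem step_fracStart (b : Int) (r : List Int) :
    isSerLoop "fractional_start" (b::r) =
      if 48 ≤ b ∧ b ≤ 57 then isSerLoop "fractional" r else false := rfl
theorem step_frac (b : Int) (r : List Int) :
    isSerLoop "fractional" (b::r) =
      if 48 ≤ b ∧ b ≤ 57 then isSerLoop "fractional" r
      else if b == 101 || b == 69 then isSerLoop "exponent_initial" r
      else false := rfl
theorem step_expInit (b : Int) (r : List Int) :
    isSerLoop "exponent_initial" (b::r) =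
      if b == 45 || b == 43 then isSerLoop "exponent_start" r
      else if 48 ≤ b ∧ b ≤ 57 then isSerLoop "exponent" r
      else false := rfl
theorem step_expStart (b : Int) (r : List Int) :
    isSerLoop "exponent_start" (b::r) =
      if 48 ≤ b ∧ b ≤ 57 then isSerLoop "exponent" r else false := rfl
theorem step_expo (b : Int) (r : List Int) :
    isSerLoop "exponent" (b::r) =
      if 48 ≤ b ∧ b ≤ 57 then isSerLoop "exponent" r else false := rfl

-- continuation after the fractional digit run (proof-only helper)
def fracCont : List Int → Bool
  | [] => true
  | l => pvExpPart l

-- continuation after the integer digit run (proof-only helper)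
def intCont : List Int → Bool
  | b :: r2 =>
      if b == 46 then
        match pvDigits1 r2 with
        | none => false
        | some [] => true
        | some r3 => pvExpPart r3
      else pvExpPart (b :: r2)
  | [] => false

theorem l_expo (xs : List Int) : isSerLoop "exponent" xs = (pvDropD xs == []) := by
  induction xs with
  | nil => decide
  | cons b r ih => rw [step_expo]; split_ifs with h <;> simp [pvDropD, h, ih]

theorem l_expStart (xs : List Int) : isSerLoop "exponent_start" xs = (pvDigits1 xs == some []) := by
  cases xs with
  | nil => decide
  | cons b r => rw [step_expStart]; split_ifs with h <;> simp [pvDigits1, h, l_expo]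

theorem l_expInit (xs : List Int) : isSerLoop "exponent_initial" xs = pvExpTail xs := by
  cases xs with
  | nil => decide
  | cons b r =>
    rw [step_expInit]
    simp only [pvExpTail]
    by_cases hs : b = 45 ∨ b = 43
    · have hnd : ¬ (48 ≤ b ∧ b ≤ 57) := by rcases hs with h | h <;> simp [h]
      rcases hs with h | h <;> simp [h, l_expStart]
    · push Not at hs
      simp only [beq_iff_eq, hs.1, hs.2, or_self, Bool.or_eq_true, if_false]
      split_ifs with h <;> simp [pvDigits1, h, l_expo]

theorem l_frac (xs : List Int) : isSerLoop "fractional" xs = fracCont (pvDropD xs) := by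
  induction xs with
  | nil => decide
  | cons b r ih =>
    rw [step_frac]
    split_ifs with h h2
    · simp [pvDropD, h, ih]
    · simp [pvDropD, h, fracCont, pvExpPart, h2, l_expInit]
    · have hne : ¬ (b = 101 ∨ b = 69) := by
        intro hc; rcases hc with hc | hc <;> simp [hc] at h2
      push Not at hne
      simp [pvDropD, h, fracCont, pvExpPart, hne.1, hne.2]

theorem l_fracStart (xs : List Int) :
    isSerLoop "fractional_start" xs =
      (match pvDigits1 xs with
       | none => false
       | some [] => true
       | some r3 => pvExpPart r3) := by
  cases xs with
  | nil => decide
  | cons b r =>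
    rw [step_fracStart]
    split_ifs with h
    · simp only [pvDigits1, if_pos h, l_frac]
      cases hd : pvDropD r with
      | nil => simp [fracCont]
      | cons u v => simp [fracCont]
    · simp [pvDigits1, h]

theorem l_int (xs : List Int) : isSerLoop "integer" xs = intCont (pvDropD xs) := by
  induction xs with
  | nil => decide
  | cons b r ih =>
    rw [step_int]
    split_ifs with h h2 h3
    · simp [pvDropD, h, ih]
    · -- b = '.'
      have hb : b = 46 := by simpa using h2
      subst hb
      have hdrop : pvDropD ((46 : Int) :: r) = (46 : Int) :: r := by simp [pvDropD]
      rw [hdrop, l_fracStart]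
      simp [intCont]
    · -- b = e or E
      have hb46 : (b == 46) = false := by simpa using h2
      have hdrop : pvDropD (b :: r) = b :: r := by simp [pvDropD, h]
      rw [hdrop]
      simp [intCont, hb46, pvExpPart, h3, l_expInit]
    · have hne : ¬ (b = 101 ∨ b = 69) := by
        intro hc; rcases hc with hc | hc <;> simp [hc] at h3
      push Not at hne
      have hb46 : (b == 46) = false := by simpa using h2
      simp [pvDropD, h, intCont, hb46, pvExpPart, hne.1, hne.2]

theorem l_intStart (xs : List Int) :
    isSerLoop "integer_start" xs =
      (match pvDigits1 xs with
       | none => false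
       | some r1 => intCont r1) := by
  cases xs with
  | nil => decide
  | cons b r =>
    rw [step_intStart]
    split_ifs with h
    · simp [pvDigits1, h, l_int]
    · simp [pvDigits1, h]

theorem alt_eq_intCont (xs : List Int) :
    is_serialised_alt xs =
      (match pvDigits1 (match xs with
                        | b :: t => if b == 45 then t else xs
                        | [] => xs) with
       | none => false
       | some r1 => intCont r1) := by
  have key : ∀ o : Option (List Int),
      (match o with
       | none => false
       | some r1 =>
         match r1 with
         | b :: r2 =>
           if b == 46 then
             match pvDigits1 r2 with
             | none => false
             | some [] => true
             | some r3 => pvExpPart r3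
           else pvExpPart (b :: r2)
         | [] => pvExpPart r1) =
      (match o with | none => false | some r1 => intCont r1) := by
    intro o
    rcases o with _ | (_ | ⟨c, r2⟩) <;> rfl
  simp only [is_serialised_alt]
  exact key _

theorem alt_cons_45 (t : List Int) :
    is_serialised_alt ((45 : Int) :: t) =
      (match pvDigits1 t with | none => false | some r1 => intCont r1) := by
  rw [alt_eq_intCont]
  rfl

theorem alt_cons (b : Int) (t : List Int) (hb : (b == 45) = false) :
    is_serialised_alt (b :: t) =
      (match pvDigits1 (b :: t) with | none => false | some r1 => intCont r1) := by
  rw [alt_eq_intCont]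
  simp [hb]

-- ===== VERDICT (by name: the statement is the Claim_ definition above) =====
theorem is_serialised_spec : Claim_equal_is_serialised := by
  intro s _
  unfold Spec_is_serialised is_serialised
  cases s with
  | nil => decide
  | cons b t =>
    rw [step_initial]
    by_cases hb : b = 45
    · subst hb
      rw [alt_cons_45, ← l_intStart]
      exact if_pos rfl
    · have hb' : (b == 45) = false := by simp [hb]
      rw [if_neg (by simp [hb]), alt_cons b t hb']
      split_ifs with h
      · rw [l_int]
        simp [pvDigits1, h]
      · simp [pvDigits1, h]
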